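-- pv_equiv track=rewrite | github.com/tahentx/gridshift | metis_faculty.py | group_cities
-- ===== SOURCE A (Python) =====
-- from itertools import combinations
--
-- def group_cities(seq):
--     for s in seq:
--         matches = []
--         s = set(s.lower())
--         for a,b in combinations(seq,2):
--             if set(a.lower()) == set(b.lower()):
--                 matches.append(a)
--     return set(matches)
-- ===== SOURCE B (Python) =====
-- def group_cities(seq):
--     # one reverse pass: a string is in the result iff a later string has the
--     # same set of lowercase characters; track the letter-sets already seen.
--     seen = set()
--     out = []
--     for s in reversed(seq):
--         k = ''.join(sorted(set(s.lower())))
--         if k in seen: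
--             out.append(s)
--         seen.add(k)
--     out.reverse()
--     return set(out)
-- ===== Notes on version B (the rewrite author's own statement) =====
-- stated objective: faster
-- what changed: Replaced the redundant outer loop over an O(n^2) scan of all pairs with repeated letter-set construction by a single reverse pass that canonicalises each string's lowercase letter-set once ('' .join(sorted(set(s.lower())))) and keeps a hash set of keys already seen, collecting a string exactly when its key occurs later.
import Mathlib
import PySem

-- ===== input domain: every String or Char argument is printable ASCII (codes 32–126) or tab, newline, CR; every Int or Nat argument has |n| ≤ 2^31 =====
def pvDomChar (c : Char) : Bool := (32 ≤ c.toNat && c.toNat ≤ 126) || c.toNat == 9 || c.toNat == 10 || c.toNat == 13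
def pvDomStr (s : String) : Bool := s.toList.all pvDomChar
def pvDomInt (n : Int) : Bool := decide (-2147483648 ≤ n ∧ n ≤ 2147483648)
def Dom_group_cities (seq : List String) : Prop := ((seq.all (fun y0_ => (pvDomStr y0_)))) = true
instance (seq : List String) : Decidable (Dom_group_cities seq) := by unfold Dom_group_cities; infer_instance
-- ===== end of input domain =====

-- B replaces A's redundant outer loop over an all-pairs letter-set comparison by one
-- reverse pass with a set of canonical letter-set keys already seen (faster).

-- ===== PORT A =====
-- set(s.lower())
def pvLetters (s : String) : PySem.Set Char := PySem.Set.ofList (PySem.Str.lower s).toList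

-- itertools.combinations(seq, 2)
def pvCombs2 : List String → List (String × String)
  | [] => []
  | x :: xs => xs.map (fun y => (x, y)) ++ pvCombs2 xs

-- literal port of A: the outer 'for s in seq' rebuilds the same 'matches' each iteration
-- (the rebinding 's = set(s.lower())' is dead and has no effect); on the empty list Python
-- raises UnboundLocalError at 'set(matches)' — excluded by Pre_group_cities.
def group_cities (seq : List String) : List String :=
  let ms := seq.foldl
    (fun _ _ =>
      (pvCombs2 seq).foldl
        (fun m ab => if PySem.Set.equal (pvLetters ab.1) (pvLetters ab.2) then m ++ [ab.1] else m)
        [])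
    []
  PySem.Set.ofList ms

-- ===== PORT B =====
-- ''.join(sorted(set(s.lower())))
def pvKeyB (s : String) : String :=
  String.ofList (PySem.List.sorted (PySem.Set.ofList (PySem.Str.lower s).toList) (fun x => x) false)

-- literal port of B: reverse pass, collect s when its key was already seen (i.e. occurs later)
def group_cities_alt (seq : List String) : List String :=
  let st := seq.reverse.foldl
    (fun (st : PySem.Set String × List String) (s : String) =>
      let k := pvKeyB s
      (PySem.Set.add st.1 k, if PySem.Set.contains st.1 k then st.2 ++ [s] else st.2))
    (PySem.Set.empty, ([] : List String))
  PySem.Set.ofList st.2.reverse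

-- ===== PRECONDITION & SPEC =====
-- Pre_ excludes only the empty list, where A raises UnboundLocalError ('matches' never bound).
def Pre_group_cities (seq : List String) : Prop := seq ≠ []
instance (seq : List String) : Decidable (Pre_group_cities seq) := by unfold Pre_group_cities; infer_instance
def pvWitness_group_cities : List String := ["ab", "Ba!"]

def Spec_group_cities (seq : List String) (out : List String) : Prop := out = group_cities_alt seq
instance (seq : List String) (out : List String) : Decidable (Spec_group_cities seq out) := by unfold Spec_group_cities; infer_instance

-- ===== CLAIM (what is proved, stated in full; the proofs are below) =====
def Claim_equal_group_cities : Prop := ∀ (seq : List String), Dom_group_cities seq → Pre_group_cities seq → Spec_group_cities seq (group_cities seq)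

-- ===== LEMMAS AND PROOFS =====

-- selection that both sides compute: keep x iff a later element has the same key
def pvGsel : List String → List String
  | [] => []
  | x :: xs => (if xs.any (fun y => pvKeyB y == pvKeyB x) then [x] else []) ++ pvGsel xs

-- Python set equality of the letter sets = equality of the canonical keys
theorem pv_key_iff (x y : String) :
    PySem.Set.equal (pvLetters x) (pvLetters y) = true ↔ pvKeyB x = pvKeyB y := by
  constructor
  · intro h
    have hm := (PySem.Set.equal_iff (pvLetters x) (pvLetters y)).mp h
    have hperm : (pvLetters x).Perm (pvLetters y) :=
      (List.perm_ext_iff_of_nodup (PySem.Set.nodup_ofList _) (PySem.Set.nodup_ofList _)).mpr hm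
    exact congrArg String.ofList
      (PySem.List.sorted_eq_sorted_of_perm _ _ _ (fun a b h => h) hperm)
  · intro h
    have h' := congrArg String.toList h
    simp only [pvKeyB, String.toList_ofList] at h'
    apply (PySem.Set.equal_iff (pvLetters x) (pvLetters y)).mpr
    intro c
    rw [← PySem.List.mem_sorted (pvLetters x) (fun x => x) false,
        ← PySem.List.mem_sorted (pvLetters y) (fun x => x) false]
    simp only [pvLetters] at h' ⊢
    rw [h']

theorem pv_key_bool (x y : String) :
    PySem.Set.equal (pvLetters x) (pvLetters y) = (pvKeyB y == pvKeyB x) := by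
  by_cases h : pvKeyB x = pvKeyB y
  · rw [(pv_key_iff x y).mpr h]
    exact (beq_iff_eq.mpr h.symm).symm
  · have h1 : PySem.Set.equal (pvLetters x) (pvLetters y) = false := by
      rw [← Bool.not_eq_true]
      exact fun hc => h ((pv_key_iff x y).mp hc)
    rw [h1]
    exact (beq_eq_false_iff_ne.mpr (Ne.symm h)).symm

-- a fold whose body ignores the state returns the body on any nonempty list
theorem pv_const_fold (M init : List String) :
    ∀ (l : List String), l ≠ [] → l.foldl (fun _ _ => M) init = M := by
  intro l hl
  induction l generalizing init with
  | nil => exact absurd rfl hl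
  | cons x xs ih =>
    rw [List.foldl_cons]
    cases xs with
    | nil => rfl
    | cons z zs => exact ih _ (by simp)

def pvMatches : List String → List String
  | [] => []
  | x :: xs =>
      (xs.filter (fun y => PySem.Set.equal (pvLetters x) (pvLetters y))).map (fun _ => x)
        ++ pvMatches xs

theorem pv_matches_eq (l : List String) : ∀ acc,
    (pvCombs2 l).foldl
      (fun m ab => if PySem.Set.equal (pvLetters ab.1) (pvLetters ab.2) then m ++ [ab.1] else m)
      acc = acc ++ pvMatches l := by
  induction l with
  | nil => intro acc; simp [pvCombs2, pvMatches]
  | cons x xs ih =>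
    intro acc
    rw [pvCombs2, List.foldl_append, pvMatches, ih]
    rw [PySem.List.foldl_append_if
      (fun ab : String × String => PySem.Set.equal (pvLetters ab.1) (pvLetters ab.2))
      (fun ab : String × String => ab.1)]
    simp [List.filter_map, List.map_map, Function.comp_def, List.append_assoc]

theorem pv_add_idem {α : Type} [BEq α] [LawfulBEq α] (s : PySem.Set α) (x : α) :
    PySem.Set.add (PySem.Set.add s x) x = PySem.Set.add s x := by
  have hdef : ∀ (t : PySem.Set α),
      PySem.Set.add t x = if PySem.Set.contains t x = true then t else t ++ [x] := fun _ => rfl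
  by_cases h : PySem.Set.contains s x = true
  · rw [hdef s, if_pos h, hdef s, if_pos h]
  · rw [hdef s, if_neg h]
    have h2 : PySem.Set.contains (s ++ [x]) x = true := by
      simp [PySem.Set.contains]
    rw [hdef (s ++ [x]), if_pos h2]

theorem pv_foldl_add_const {α : Type} [BEq α] [LawfulBEq α] (x : α) :
    ∀ (ys : List α) (acc : PySem.Set α), ys ≠ [] → (∀ y ∈ ys, y = x) →
      ys.foldl PySem.Set.add acc = PySem.Set.add acc x := by
  intro ys
  induction ys with
  | nil => intro acc h; exact absurd rfl h
  | cons z zs ih =>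
    intro acc _ hall
    have hz : z = x := hall z (by simp)
    subst hz
    cases zs with
    | nil => rfl
    | cons w ws =>
      rw [List.foldl_cons, ih _ (by simp) (fun y hy => hall y (by simp [hy])), pv_add_idem]

theorem pv_matches_gsel (l : List String) : ∀ (acc : PySem.Set String),
    (pvMatches l).foldl PySem.Set.add acc = (pvGsel l).foldl PySem.Set.add acc := by
  induction l with
  | nil => intro acc; rfl
  | cons x xs ih =>
    intro acc
    rw [pvMatches, pvGsel, List.foldl_append, List.foldl_append]
    simp only [pv_key_bool]
    by_cases h : xs.any (fun y => pvKeyB y == pvKeyB x)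
    · rw [if_pos h]
      have hne : (xs.filter (fun y => pvKeyB y == pvKeyB x)).map (fun _ => x) ≠ [] := by
        simp only [ne_eq, List.map_eq_nil_iff, List.filter_eq_nil_iff]
        simp only [List.any_eq_true] at h
        obtain ⟨y, hy, hk⟩ := h
        intro hc
        exact absurd hk (by simpa using hc y hy)
      have hall : ∀ y ∈ (xs.filter (fun y => pvKeyB y == pvKeyB x)).map (fun _ => x), y = x := by
        intro y hy
        rcases List.mem_map.mp hy with ⟨a, _, he⟩
        exact he.symm
      rw [pv_foldl_add_const x _ acc hne hall,
        show List.foldl PySem.Set.add acc [x] = PySem.Set.add acc x from rfl]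
      exact ih _
    · rw [if_neg h]
      have hnil : xs.filter (fun y => pvKeyB y == pvKeyB x) = [] := by
        rw [List.filter_eq_nil_iff]
        intro a ha hb
        exact h (List.any_eq_true.mpr ⟨a, ha, hb⟩)
      rw [hnil]
      simpa using ih acc

theorem pv_alt_state (l : List String) :
    l.reverse.foldl
      (fun (st : PySem.Set String × List String) (s : String) =>
        (PySem.Set.add st.1 (pvKeyB s),
         if PySem.Set.contains st.1 (pvKeyB s) then st.2 ++ [s] else st.2))
      (PySem.Set.empty, ([] : List String))
    = (PySem.Set.ofList (l.reverse.map pvKeyB), (pvGsel l).reverse) := by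
  induction l with
  | nil => rfl
  | cons x xs ih =>
    rw [List.reverse_cons, List.foldl_append, ih]
    have hcont : PySem.Set.contains (PySem.Set.ofList (xs.reverse.map pvKeyB)) (pvKeyB x)
        = xs.any (fun y => pvKeyB y == pvKeyB x) := by
      by_cases h : xs.any (fun y => pvKeyB y == pvKeyB x)
      · rw [h]
        apply (PySem.Set.contains_iff _ _).mpr
        rw [PySem.Set.mem_ofList]
        simp only [List.any_eq_true] at h
        obtain ⟨y, hy, hk⟩ := h
        simp only [List.mem_map, List.mem_reverse]
        exact ⟨y, hy, eq_of_beq hk⟩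
      · simp only [Bool.not_eq_true] at h
        rw [h, ← Bool.not_eq_true]
        intro hc
        have hm := (PySem.Set.contains_iff _ _).mp hc
        rw [PySem.Set.mem_ofList] at hm
        simp only [List.mem_map, List.mem_reverse] at hm
        obtain ⟨y, hy, hk⟩ := hm
        have : xs.any (fun y => pvKeyB y == pvKeyB x) = true := by
          simp only [List.any_eq_true]
          exact ⟨y, hy, beq_iff_eq.mpr hk⟩
        rw [h] at this
        exact Bool.false_ne_true this
    simp only [List.foldl_cons, List.foldl_nil]
    have h1 : PySem.Set.add (PySem.Set.ofList (xs.reverse.map pvKeyB)) (pvKeyB x)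
        = PySem.Set.ofList ((x :: xs).reverse.map pvKeyB) := by
      simp [PySem.Set.ofList, List.foldl_append]
    have h2 : (if PySem.Set.contains (PySem.Set.ofList (xs.reverse.map pvKeyB)) (pvKeyB x)
          then (pvGsel xs).reverse ++ [x] else (pvGsel xs).reverse)
        = (pvGsel (x :: xs)).reverse := by
      rw [hcont, pvGsel]
      by_cases h : xs.any (fun y => pvKeyB y == pvKeyB x)
      · rw [if_pos h, if_pos h]
        simp
      · rw [if_neg h, if_neg h]
        simp
    rw [h1, h2]
    simp

theorem pv_alt_eq (l : List String) : group_cities_alt l = PySem.Set.ofList (pvGsel l) := by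
  unfold group_cities_alt
  rw [pv_alt_state]
  simp

-- ===== VERDICT (by name: the statement is the Claim_ definition above) =====
theorem group_cities_spec : Claim_equal_group_cities := by
  intro seq _ hpre
  unfold Spec_group_cities
  unfold group_cities
  rw [pv_const_fold _ _ seq hpre, pv_matches_eq seq [], List.nil_append, pv_alt_eq]
  show (pvMatches seq).foldl PySem.Set.add PySem.Set.empty
      = (pvGsel seq).foldl PySem.Set.add PySem.Set.empty
  exact pv_matches_gsel seq _
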